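-- pv_equiv track=rewrite | github.com/nationalarchives/da-ayr-beta-webapp | app/main/util/search_utils.py | rearrange_opensearch_results_for_relevant_fields
-- ===== SOURCE A (Python) =====
-- def rearrange_opensearch_results_for_relevant_fields(results, sort):
--     """
--     Rearrange OpenSearch results to display relevant highlight fields based on the specified sort order.
--
--     Args:
--         results (list): A list of OpenSearch result dictionaries.
--         sort (str): The field used for sorting ("file_name", "description", "metadata", or "content").
--
--     Returns:
--         list: The rearranged OpenSearch results with updated highlight fields.
--     """
--     results_clone = results.copy()
--
--     for result in results_clone:
--         if "highlight" not in result: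
--             continue
--         highlight_fields = result["highlight"]
--
--         if sort == "file_name":
--             ordered_highlight = reorder_fields(highlight_fields, ["file_name"])
--         elif sort == "description":
--             ordered_highlight = reorder_fields(
--                 highlight_fields, ["description", "file_name"]
--             )
--         elif sort == "metadata":
--             ordered_highlight = reorder_fields(
--                 highlight_fields, [], ["file_name", "content"]
--             )
--         elif sort == "content":
--             ordered_highlight = reorder_fields(
--                 highlight_fields, ["content", "file_name"]
--             )
--         else:
--             ordered_highlight = highlight_fields
--
--         result["highlight"] = ordered_highlight
--
--     return results_clone
--
-- def reorder_fields(fields, priority_fields=[], last_fields=[]):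
--     """
--     Rearranges a dictionary's fields based on priority and last field rules.
--
--     Args:
--         fields (dict): Dictionary of fields to reorder.
--         priority_fields (list): Fields to move to the top in order.
--         last_fields (list): Fields to move to the bottom in order.
--
--     Returns:
--         dict: Reordered dictionary of fields.
--     """
--     fields_at_top = {k: fields[k] for k in priority_fields if k in fields}
--     fields_at_bottom = {k: fields[k] for k in last_fields if k in fields}
--     middle_fields = {
--         k: v
--         for k, v in fields.items()
--         if k not in fields_at_top and k not in fields_at_bottom
--     }
--     ordered_fields = {**fields_at_top, **middle_fields, **fields_at_bottom}
--
--     return ordered_fields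
-- ===== SOURCE B (Python) =====
-- _SPEC = {
--     "file_name": (["file_name"], []),
--     "description": (["description", "file_name"], []),
--     "metadata": ([], ["file_name", "content"]),
--     "content": (["content", "file_name"], []),
-- }
--
--
-- def _rank(key, priority_fields, last_fields):
--     if key in priority_fields:
--         return priority_fields.index(key)
--     if key in last_fields:
--         return 200 + last_fields.index(key)
--     return 100
--
--
-- def rearrange_opensearch_results_for_relevant_fields(results, sort):
--     results_clone = results.copy()
--     if sort not in _SPEC:
--         return results_clone
--     priority_fields, last_fields = _SPEC[sort]
--     for result in results_clone:
--         if "highlight" in result: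
--             result["highlight"] = dict(
--                 sorted(
--                     result["highlight"].items(),
--                     key=lambda kv: _rank(kv[0], priority_fields, last_fields),
--                 )
--             )
--     return results_clone
-- ===== Notes on version B (the rewrite author's own statement) =====
-- stated objective: alternative
-- what changed: Replaces the per-result three-way partition (two dict comprehensions over priority/last plus a middle comprehension, merged with {**a,**b,**c}) by a single stable sort of the highlight items under a numeric rank (index in priority, a middle rank, or an offset plus index in last), with the sort's (priority,last) pair looked up once in a table instead of an if/elif chain.
import Mathlib
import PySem

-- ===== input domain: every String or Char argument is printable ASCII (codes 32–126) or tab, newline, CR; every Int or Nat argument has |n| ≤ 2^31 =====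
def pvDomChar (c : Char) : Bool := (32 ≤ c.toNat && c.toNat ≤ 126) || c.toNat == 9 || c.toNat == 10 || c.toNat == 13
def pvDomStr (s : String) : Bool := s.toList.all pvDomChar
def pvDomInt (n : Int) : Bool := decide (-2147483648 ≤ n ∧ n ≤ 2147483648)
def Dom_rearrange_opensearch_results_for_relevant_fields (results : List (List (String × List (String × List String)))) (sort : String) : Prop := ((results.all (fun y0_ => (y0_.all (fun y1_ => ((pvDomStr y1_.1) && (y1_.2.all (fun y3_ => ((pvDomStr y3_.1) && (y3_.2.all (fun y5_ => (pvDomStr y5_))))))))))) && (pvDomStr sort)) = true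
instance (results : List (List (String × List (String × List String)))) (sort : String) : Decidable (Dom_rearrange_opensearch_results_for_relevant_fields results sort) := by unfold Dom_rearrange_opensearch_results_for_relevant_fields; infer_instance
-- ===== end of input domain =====

-- B replaces A's three partition comprehensions + dict merge by ONE stable sort of the highlight items under a
-- numeric rank (priority index / middle / last index); equivalence is about the RETURN value only (Python A and B
-- both mutate the shallow-copied result dicts in place in the same way).

-- ===== PORT A =====
-- reorder_fields: dict comprehensions are folds of Dict.insert; fields[k] under the "k in fields" guard is getD;
-- {**a, **b, **c} is update with each dict's items in turn.
def pyReorderFields (fields : PySem.Dict String (List String)) (priority last_ : List String) :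
    PySem.Dict String (List String) :=
  let fields_at_top :=
    priority.foldl (fun d k => if fields.contains k then d.insert k (fields.getD k []) else d) PySem.Dict.empty
  let fields_at_bottom :=
    last_.foldl (fun d k => if fields.contains k then d.insert k (fields.getD k []) else d) PySem.Dict.empty
  let middle_fields :=
    fields.items.foldl
      (fun d kv => if !fields_at_top.contains kv.1 && !fields_at_bottom.contains kv.1 then d.insert kv.1 kv.2 else d)
      PySem.Dict.empty
  ((PySem.Dict.empty.update fields_at_top.items).update middle_fields.items).update fields_at_bottom.items

def rearrange_opensearch_results_for_relevant_fields (results : List (List (String × List (String × List String)))) (sort : String) : List (List (String × List (String × List String))) :=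
  results.map (fun result =>
    let rd : PySem.Dict String (List (String × List String)) := PySem.Dict.mk result
    if rd.contains "highlight" then
      let highlight_fields : PySem.Dict String (List String) := PySem.Dict.mk (rd.getD "highlight" [])
      let ordered_highlight :=
        if sort == "file_name" then pyReorderFields highlight_fields ["file_name"] []
        else if sort == "description" then pyReorderFields highlight_fields ["description", "file_name"] []
        else if sort == "metadata" then pyReorderFields highlight_fields [] ["file_name", "content"]
        else if sort == "content" then pyReorderFields highlight_fields ["content", "file_name"] []
        else highlight_fields
      (rd.insert "highlight" ordered_highlight.items).items
    else result)

-- ===== PORT B =====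
def pvSpecAlt : PySem.Dict String (List String × List String) :=
  PySem.Dict.ofList
    [("file_name", (["file_name"], [])),
     ("description", (["description", "file_name"], [])),
     ("metadata", ([], ["file_name", "content"])),
     ("content", (["content", "file_name"], []))]

-- _rank: "k in priority: priority.index(k)" is List.index?
def pvRankAlt (k : String) (priority last_ : List String) : Int :=
  match PySem.List.index? priority k with
  | some i => (i : Int)
  | none =>
    match PySem.List.index? last_ k with
    | some j => 200 + (j : Int)
    | none => 100

def rearrange_opensearch_results_for_relevant_fields_alt (results : List (List (String × List (String × List String)))) (sort : String) : List (List (String × List (String × List String))) :=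
  match pvSpecAlt.get? sort with
  | none => results
  | some (priority, last_) =>
    results.map (fun result =>
      let rd : PySem.Dict String (List (String × List String)) := PySem.Dict.mk result
      if rd.contains "highlight" then
        let sortedItems :=
          PySem.List.sorted (PySem.Dict.mk (rd.getD "highlight" [])).items
            (fun kv => pvRankAlt kv.1 priority last_) false
        (rd.insert "highlight" (PySem.Dict.ofList sortedItems).items).items
      else result)

-- ===== PRECONDITION & SPEC =====
-- Pre_ requires every association list (each result dict and each highlight dict inside it) to have distinct
-- keys: these lists represent Python dicts, whose keys are unique by construction, so no input reachable from
-- Python is excluded.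
def Pre_rearrange_opensearch_results_for_relevant_fields (results : List (List (String × List (String × List String)))) (sort : String) : Prop :=
  ∀ r ∈ results, (r.map Prod.fst).Nodup ∧ ∀ kv ∈ r, (kv.2.map Prod.fst).Nodup
instance (results : List (List (String × List (String × List String)))) (sort : String) : Decidable (Pre_rearrange_opensearch_results_for_relevant_fields results sort) := by unfold Pre_rearrange_opensearch_results_for_relevant_fields; infer_instance

def pvWitness_rearrange_opensearch_results_for_relevant_fields : (List (List (String × List (String × List String)))) × String :=
  ([[("highlight", [("content", ["c1"]), ("file_name", ["f"]), ("description", ["d"])])]], "content")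

def Spec_rearrange_opensearch_results_for_relevant_fields (results : List (List (String × List (String × List String)))) (sort : String) (out : List (List (String × List (String × List String)))) : Prop := out = rearrange_opensearch_results_for_relevant_fields_alt results sort
instance (results : List (List (String × List (String × List String)))) (sort : String) (out : List (List (String × List (String × List String)))) : Decidable (Spec_rearrange_opensearch_results_for_relevant_fields results sort out) := by unfold Spec_rearrange_opensearch_results_for_relevant_fields; infer_instance

-- ===== CLAIM (what is proved, stated in full; the proofs are below) =====
def Claim_equal_rearrange_opensearch_results_for_relevant_fields : Prop := ∀ (results : List (List (String × List (String × List String)))) (sort : String), Dom_rearrange_opensearch_results_for_relevant_fields results sort → Pre_rearrange_opensearch_results_for_relevant_fields results sort → Spec_rearrange_opensearch_results_for_relevant_fields results sort (rearrange_opensearch_results_for_relevant_fields results sort)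

-- ===== LEMMAS AND PROOFS =====

-- insertBy prepends when everything is strictly greater under the key
theorem pv_insertBy_all_lt {α : Type} (key : α → Int) (x : α) (L : List α)
    (h : ∀ y ∈ L, key x < key y) :
    PySem.List.insertBy (fun a b => decide (key a < key b)) x L = x :: L := by
  cases L with
  | nil => rfl
  | cons y ys =>
    simp only [PySem.List.insertBy]
    rw [if_pos (by simpa using h y (by simp))]

theorem pv_insertBy_append {α : Type} (key : α → Int) (x : α) (L1 L2 : List α)
    (h : ∀ y ∈ L1, ¬ key x < key y) :
    PySem.List.insertBy (fun a b => decide (key a < key b)) x (L1 ++ L2)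
      = L1 ++ PySem.List.insertBy (fun a b => decide (key a < key b)) x L2 := by
  induction L1 with
  | nil => rfl
  | cons y ys ih =>
    simp only [List.cons_append, PySem.List.insertBy]
    rw [if_neg (by simpa using h y (by simp))]
    have := ih (fun z hz => h z (by simp [hz]))
    cases hys : ys ++ L2 with
    | nil => simp [hys] at this ⊢; simpa [PySem.List.insertBy] using this
    | cons a t => rw [← hys]; simp [this]

-- stable insertion into a rank-grouped list lands at the end of the element's own group
theorem pv_insertBy_groups {α : Type} (key : α → Int) (x : α) (rs : List Int)
    (hrs : rs.Pairwise (· < ·)) (hx : key x ∈ rs) (g : Int → List α)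
    (hg : ∀ r ∈ rs, ∀ y ∈ g r, key y = r) :
    PySem.List.insertBy (fun a b => decide (key a < key b)) x (rs.flatMap g)
      = rs.flatMap (fun r => g r ++ if key x = r then [x] else []) := by
  induction rs with
  | nil => simp at hx
  | cons r rest ih =>
    have hrlt : ∀ r' ∈ rest, r < r' := (List.pairwise_cons.mp hrs).1
    have hrest : rest.Pairwise (· < ·) := (List.pairwise_cons.mp hrs).2
    simp only [List.flatMap_cons]
    by_cases hkx : key x = r
    · rw [pv_insertBy_append key x (g r) _
          (by intro y hy; rw [hg r (by simp) y hy, hkx]; omega)]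
      have hlt : ∀ y ∈ rest.flatMap g, key x < key y := by
        intro y hy
        obtain ⟨r', hr', hy'⟩ := List.mem_flatMap.mp hy
        rw [hg r' (by simp [hr']) y hy', hkx]
        exact hrlt r' hr'
      rw [pv_insertBy_all_lt key x _ hlt]
      rw [if_pos hkx]
      have : rest.flatMap (fun r' => g r' ++ if key x = r' then [x] else [])
          = rest.flatMap g := by
        apply List.flatMap_congr
        intro r' hr'
        rw [if_neg (by have := hrlt r' hr'; omega)]
        simp
      rw [this]; simp
    · have hxrest : key x ∈ rest := by
        rcases List.mem_cons.mp hx with h | h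
        · exact absurd h hkx
        · exact h
      have hgtr : r < key x := hrlt _ hxrest
      rw [pv_insertBy_append key x (g r) _
          (by intro y hy; rw [hg r (by simp) y hy]; omega)]
      rw [ih hrest hxrest (fun r' hr' => hg r' (by simp [hr']))]
      rw [if_neg hkx]; simp

-- stable sort of a list whose key values all lie in the strictly increasing list rs is the
-- concatenation of the per-rank filters
theorem pv_sorted_groups {α : Type} (key : α → Int) (rs : List Int) (xs : List α)
    (hrs : rs.Pairwise (· < ·)) (h : ∀ x ∈ xs, key x ∈ rs) :
    PySem.List.sorted xs key false
      = rs.flatMap (fun r => xs.filter (fun x => decide (key x = r))) := by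
  rw [PySem.List.sorted_eq_foldl_insertBy]
  induction xs using List.reverseRecOn with
  | nil => simp
  | append_singleton ys x ih =>
    rw [List.foldl_append, List.foldl_cons, List.foldl_nil]
    rw [ih (fun z hz => h z (by simp [hz]))]
    rw [pv_insertBy_groups key x rs hrs (h x (by simp))
        (g := fun r => ys.filter (fun y => decide (key y = r)))
        (by intro r hr y hy; simpa using (List.mem_filter.mp hy).2)]
    apply List.flatMap_congr
    intro r hr
    simp [List.filter_append]
    split <;> simp_all

-- a guarded insert-fold over pairs with distinct fresh keys builds exactly the filtered list
theorem pv_fold_insert_filter {β : Type} (l : List (String × β)) (p : String × β → Bool)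
    (d : PySem.Dict String β)
    (hfresh : ∀ kv ∈ l, d.contains kv.1 = false) (hnd : (l.map Prod.fst).Nodup) :
    (l.foldl (fun d kv => if p kv then d.insert kv.1 kv.2 else d) d).items
      = d.items ++ l.filter p := by
  induction l generalizing d with
  | nil => simp
  | cons kv t ih =>
    rw [List.map_cons] at hnd
    have hndt : (t.map Prod.fst).Nodup := (List.nodup_cons.mp hnd).2
    have hne : ∀ kv' ∈ t, kv'.1 ≠ kv.1 := by
      intro kv' h' heq
      exact (List.nodup_cons.mp hnd).1 (heq ▸ List.mem_map_of_mem h')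
    rw [List.foldl_cons]
    by_cases hp : p kv
    · rw [if_pos hp]
      rw [ih _ (by
        intro kv' h'
        rw [PySem.Dict.contains_insert]
        simp [hfresh kv' (by simp [h']), hne kv' h']) hndt]
      rw [PySem.Dict.items_insert_of_not_contains _ _ (hfresh kv (by simp))]
      simp [hp]
    · rw [if_neg hp]
      rw [ih _ (fun kv' h' => hfresh kv' (by simp [h'])) hndt]
      simp [hp]

-- the dict comprehension over a key list
theorem pv_fold_keys_filter {β : Type} (ks : List String) (fd : PySem.Dict String β)
    (dflt : β) (d : PySem.Dict String β)
    (hfresh : ∀ k ∈ ks, d.contains k = false) (hnd : ks.Nodup) :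
    (ks.foldl (fun d k => if fd.contains k then d.insert k (fd.getD k dflt) else d) d).items
      = d.items ++ (ks.filter (fun k => fd.contains k)).map (fun k => (k, fd.getD k dflt)) := by
  induction ks generalizing d with
  | nil => simp
  | cons k t ih =>
    have hndt : t.Nodup := (List.nodup_cons.mp hnd).2
    have hne : ∀ k' ∈ t, k' ≠ k := fun k' h' heq => (List.nodup_cons.mp hnd).1 (heq ▸ h')
    rw [List.foldl_cons]
    by_cases hc : fd.contains k
    · rw [if_pos hc]
      rw [ih _ (by
        intro k' h'
        rw [PySem.Dict.contains_insert]
        simp [hfresh k' (by simp [h']), hne k' h']) hndt]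
      rw [PySem.Dict.items_insert_of_not_contains _ _ (hfresh k (by simp))]
      simp [hc]
    · rw [if_neg hc]
      rw [ih _ (fun k' h' => hfresh k' (by simp [h'])) hndt]
      simp [hc]

-- filtering an association list with distinct keys for one key
theorem pv_filter_key {β : Type} (l : List (String × β)) (k : String) (dflt : β)
    (hnd : (l.map Prod.fst).Nodup) :
    l.filter (fun kv => kv.1 == k)
      = if (PySem.Dict.mk l).contains k then [(k, (PySem.Dict.mk l).getD k dflt)] else [] := by
  induction l with
  | nil => simp [PySem.Dict.contains]
  | cons kv t ih =>
    obtain ⟨k1, v1⟩ := kv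
    rw [List.map_cons] at hnd
    have hndt := (List.nodup_cons.mp hnd).2
    have hni := (List.nodup_cons.mp hnd).1
    rw [List.filter_cons]
    by_cases hk : k1 = k
    · subst hk
      have hfilt : t.filter (fun kv => kv.1 == k1) = [] := by
        apply List.filter_eq_nil_iff.mpr
        intro kv' h'
        simp only [beq_iff_eq]
        intro heq
        exact hni (List.mem_map.mpr ⟨kv', h', heq⟩)
      have hcon : (PySem.Dict.mk ((k1, v1) :: t)).contains k1 = true := by
        simp [PySem.Dict.contains, PySem.Dict.get?_mk_cons]
      have hget : (PySem.Dict.mk ((k1, v1) :: t)).getD k1 dflt = v1 := by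
        simp [PySem.Dict.getD, PySem.Dict.get?_mk_cons]
      simp [hcon, hget, hfilt]
    · have hcon : (PySem.Dict.mk ((k1, v1) :: t)).contains k = (PySem.Dict.mk t).contains k := by
        simp [PySem.Dict.contains, PySem.Dict.get?_mk_cons, hk]
      have hget : (PySem.Dict.mk ((k1, v1) :: t)).getD k dflt = (PySem.Dict.mk t).getD k dflt := by
        simp [PySem.Dict.getD, PySem.Dict.get?_mk_cons, hk]
      rw [hcon, hget]
      simp only [beq_iff_eq]
      rw [if_neg (by simpa using hk)]
      exact ih hndt

-- overwriting an existing key with its current value is the identity on items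
theorem pv_insert_getD_self {β : Type} (d : PySem.Dict String β) (k : String) (dflt : β)
    (hnd : d.keys.Nodup) (hc : d.contains k = true) :
    (d.insert k (d.getD k dflt)).items = d.items := by
  rw [PySem.Dict.items_insert_of_contains _ _ hc]
  conv_rhs => rw [← List.map_id d.items]
  apply List.map_congr_left
  intro p hp
  obtain ⟨p1, p2⟩ := p
  by_cases hpk : p1 = k
  · subst hpk
    have : d.getD p1 dflt = p2 := PySem.Dict.getD_of_mem_items d (by exact hp) hnd dflt
    simp [this]
  · simp [hpk]

-- dict(...) of a pair list with distinct keys keeps the list as it is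
theorem pv_ofList_items {β : Type} (l : List (String × β)) (hnd : (l.map Prod.fst).Nodup) :
    (PySem.Dict.ofList l).items = l := by
  have := PySem.Dict.items_foldl_insert_fresh l Prod.fst Prod.snd PySem.Dict.empty
    (by intro a _; simp [PySem.Dict.contains_empty]) hnd
  simpa [PySem.Dict.ofList, PySem.Dict.update] using this

-- A-side canonical form of reorder_fields: top block ++ middle block ++ bottom block
theorem pv_reorder_items (fields : List (String × List String))
    (hnd : (fields.map Prod.fst).Nodup) (priority last_ : List String)
    (hp : priority.Nodup) (hl : last_.Nodup) (hdisj : ∀ k ∈ priority, k ∉ last_) :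
    (pyReorderFields (PySem.Dict.mk fields) priority last_).items
      = (priority.filter (fun k => (PySem.Dict.mk fields).contains k)).map
          (fun k => (k, (PySem.Dict.mk fields).getD k []))
        ++ fields.filter (fun kv => decide (kv.1 ∉ priority) && decide (kv.1 ∉ last_))
        ++ (last_.filter (fun k => (PySem.Dict.mk fields).contains k)).map
            (fun k => (k, (PySem.Dict.mk fields).getD k [])) := by
  set fd := PySem.Dict.mk fields with hfd
  have hfdk : fd.keys = fields.map Prod.fst := rfl
  have hfc : ∀ kv ∈ fields, fd.contains kv.1 = true := by
    intro kv h
    exact (PySem.Dict.contains_iff_mem_keys fd kv.1).mpr (hfdk ▸ List.mem_map_of_mem h)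
  unfold pyReorderFields
  simp only []
  set top := priority.foldl (fun d k => if fd.contains k then d.insert k (fd.getD k []) else d) PySem.Dict.empty with htop
  set bottom := last_.foldl (fun d k => if fd.contains k then d.insert k (fd.getD k []) else d) PySem.Dict.empty with hbot
  have htopi : top.items = (priority.filter (fun k => fd.contains k)).map (fun k => (k, fd.getD k [])) := by
    rw [htop, pv_fold_keys_filter priority fd [] _ (by intro k _; exact PySem.Dict.contains_empty k) hp]
    simp [PySem.Dict.empty]
  have hboti : bottom.items = (last_.filter (fun k => fd.contains k)).map (fun k => (k, fd.getD k [])) := by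
    rw [hbot, pv_fold_keys_filter last_ fd [] _ (by intro k _; exact PySem.Dict.contains_empty k) hl]
    simp [PySem.Dict.empty]
  have htopk : top.keys = priority.filter (fun k => fd.contains k) := by
    simp only [PySem.Dict.keys, htopi, List.map_map]
    simp [Function.comp_def]
  have hbotk : bottom.keys = last_.filter (fun k => fd.contains k) := by
    simp only [PySem.Dict.keys, hboti, List.map_map]
    simp [Function.comp_def]
  have htopc : ∀ kv ∈ fields, (top.contains kv.1 = true ↔ kv.1 ∈ priority) := by
    intro kv h
    rw [PySem.Dict.contains_iff_mem_keys, htopk, List.mem_filter]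
    simp [hfc kv h]
  have hbotc : ∀ kv ∈ fields, (bottom.contains kv.1 = true ↔ kv.1 ∈ last_) := by
    intro kv h
    rw [PySem.Dict.contains_iff_mem_keys, hbotk, List.mem_filter]
    simp [hfc kv h]
  set p := fun kv : String × List String => !top.contains kv.1 && !bottom.contains kv.1 with hpdef
  set middle := fields.foldl (fun d kv => if p kv then d.insert kv.1 kv.2 else d) PySem.Dict.empty with hmid
  have hmidi : middle.items = fields.filter p := by
    rw [hmid, pv_fold_insert_filter fields p _ (by intro kv _; exact PySem.Dict.contains_empty kv.1) hnd]
    simp [PySem.Dict.empty]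
  have h1 : PySem.Dict.empty.update top.items = top := by
    apply PySem.Dict.ext
    have := PySem.Dict.items_foldl_insert_fresh top.items Prod.fst Prod.snd PySem.Dict.empty
      (by intro a _; exact PySem.Dict.contains_empty a.1)
      (by rw [show top.items.map Prod.fst = top.keys from rfl, htopk]; exact hp.filter _)
    simpa [PySem.Dict.update] using this
  rw [h1]
  have h2 : (top.update middle.items).items = top.items ++ middle.items := by
    have := PySem.Dict.items_foldl_insert_fresh middle.items Prod.fst Prod.snd top
      (by
        intro kv hkv
        rw [hmidi] at hkv
        have hpkv := (List.mem_filter.mp hkv).2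
        rw [hpdef] at hpkv
        simp only [Bool.and_eq_true, Bool.not_eq_true'] at hpkv
        exact hpkv.1)
      (by
        rw [show middle.items.map Prod.fst = middle.keys from rfl]
        simp only [PySem.Dict.keys, hmidi]
        exact (hnd.sublist (List.Sublist.map Prod.fst (List.filter_sublist))))
    simpa [PySem.Dict.update] using this
  have h3 : ((top.update middle.items).update bottom.items).items
      = (top.items ++ middle.items) ++ bottom.items := by
    have := PySem.Dict.items_foldl_insert_fresh bottom.items Prod.fst Prod.snd (top.update middle.items)
      (by
        intro kv hkv
        have hkv1 : kv.1 ∈ last_ := by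
          rw [hboti] at hkv
          obtain ⟨k, hk, hkk⟩ := List.mem_map.mp hkv
          rw [← hkk]
          exact (List.mem_filter.mp hk).1
        have hbc : bottom.contains kv.1 = true := by
          rw [PySem.Dict.contains_iff_mem_keys, hbotk, List.mem_filter]
          rw [hboti] at hkv
          obtain ⟨k, hk, hkk⟩ := List.mem_map.mp hkv
          rw [← hkk]
          simpa using hk
        rw [← Bool.not_eq_true]
        rw [PySem.Dict.contains_iff_mem_keys]
        intro hmem
        have : (top.update middle.items).keys = top.keys ++ middle.keys := by
          simp only [PySem.Dict.keys, h2, List.map_append]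
        rw [this, List.mem_append] at hmem
        rcases hmem with hmem | hmem
        · rw [htopk] at hmem
          exact hdisj kv.1 (List.mem_filter.mp hmem).1 hkv1
        · simp only [PySem.Dict.keys, hmidi] at hmem
          obtain ⟨kv', hkv', hk'⟩ := List.mem_map.mp hmem
          have hpkv := (List.mem_filter.mp hkv').2
          rw [hpdef] at hpkv
          simp only [Bool.and_eq_true, Bool.not_eq_true'] at hpkv
          rw [hk'] at hpkv
          rw [hbc] at hpkv
          exact absurd hpkv.2 (by simp))
      (by
        rw [show bottom.items.map Prod.fst = bottom.keys from rfl, hbotk]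
        exact hl.filter _)
    have h2' := h2
    simp only [PySem.Dict.update] at h2'
    simpa [PySem.Dict.update, h2', List.append_assoc] using this
  have hfilter : fields.filter p
      = fields.filter (fun kv => decide (kv.1 ∉ priority) && decide (kv.1 ∉ last_)) := by
    apply List.filter_congr
    intro kv hkv
    have ht : top.contains kv.1 = decide (kv.1 ∈ priority) := by
      cases hcc : top.contains kv.1 with
      | true => simp [(htopc kv hkv).mp hcc]
      | false =>
        by_cases h : kv.1 ∈ priority
        · rw [(htopc kv hkv).mpr h] at hcc; exact absurd hcc (by simp)
        · simp [h]
    have hb : bottom.contains kv.1 = decide (kv.1 ∈ last_) := by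
      cases hcc : bottom.contains kv.1 with
      | true => simp [(hbotc kv hkv).mp hcc]
      | false =>
        by_cases h : kv.1 ∈ last_
        · rw [(hbotc kv hkv).mpr h] at hcc; exact absurd hcc (by simp)
        · simp [h]
    rw [hpdef]
    simp [ht, hb]
  rw [h3, htopi, hboti, hmidi, List.append_assoc]
  rw [hfilter, List.append_assoc]

-- rank values of pvRankAlt on the literal priority/last lists of each sort branch
theorem pvRank1_a (ka : String) : pvRankAlt ka [ka] [] = 0 := by
  simp [pvRankAlt, PySem.List.index?, List.idxOf?_cons, List.idxOf?_nil]
theorem pvRank1_o (ka k : String) (h1 : k ≠ ka) : pvRankAlt k [ka] [] = 100 := by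
  simp [pvRankAlt, PySem.List.index?, List.idxOf?_cons, List.idxOf?_nil, h1.symm]
theorem pvRank2_a (ka kb : String) : pvRankAlt ka [ka, kb] [] = 0 := by
  simp [pvRankAlt, PySem.List.index?, List.idxOf?_cons, List.idxOf?_nil]
theorem pvRank2_b (ka kb : String) (hab : ka ≠ kb) : pvRankAlt kb [ka, kb] [] = 1 := by
  simp [pvRankAlt, PySem.List.index?, List.idxOf?_cons, List.idxOf?_nil, hab]
theorem pvRank2_o (ka kb k : String) (h1 : k ≠ ka) (h2 : k ≠ kb) :
    pvRankAlt k [ka, kb] [] = 100 := by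
  simp [pvRankAlt, PySem.List.index?, List.idxOf?_cons, List.idxOf?_nil, h1.symm, h2.symm]
theorem pvRankL_a (ka kb : String) : pvRankAlt ka [] [ka, kb] = 200 := by
  simp [pvRankAlt, PySem.List.index?, List.idxOf?_cons, List.idxOf?_nil]
theorem pvRankL_b (ka kb : String) (hab : ka ≠ kb) : pvRankAlt kb [] [ka, kb] = 201 := by
  simp [pvRankAlt, PySem.List.index?, List.idxOf?_cons, List.idxOf?_nil, hab]
theorem pvRankL_o (ka kb k : String) (h1 : k ≠ ka) (h2 : k ≠ kb) :
    pvRankAlt k [] [ka, kb] = 100 := by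
  simp [pvRankAlt, PySem.List.index?, List.idxOf?_cons, List.idxOf?_nil, h1.symm, h2.symm]

-- B-side canonical forms of the rank sort, per branch shape
theorem pv_sorted_prio1 (fields : List (String × List String))
    (hnd : (fields.map Prod.fst).Nodup) (ka : String) :
    PySem.List.sorted fields (fun kv => pvRankAlt kv.1 [ka] []) false
      = (if (PySem.Dict.mk fields).contains ka then [(ka, (PySem.Dict.mk fields).getD ka [])] else [])
        ++ fields.filter (fun kv => decide (kv.1 ≠ ka)) := by
  rw [pv_sorted_groups _ [0, 100] fields (by decide)
      (by
        intro kv _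
        by_cases h1 : kv.1 = ka
        · rw [h1, pvRank1_a]; simp
        · rw [pvRank1_o ka kv.1 h1]; simp)]
  have g0 : fields.filter (fun kv => decide (pvRankAlt kv.1 [ka] [] = 0))
      = fields.filter (fun kv => kv.1 == ka) := by
    apply List.filter_congr
    intro kv _
    by_cases h1 : kv.1 = ka
    · rw [h1, pvRank1_a]; simp [h1]
    · rw [pvRank1_o ka kv.1 h1]; simp [h1]
  have g2 : fields.filter (fun kv => decide (pvRankAlt kv.1 [ka] [] = 100))
      = fields.filter (fun kv => decide (kv.1 ≠ ka)) := by
    apply List.filter_congr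
    intro kv _
    by_cases h1 : kv.1 = ka
    · rw [h1, pvRank1_a]; simp [h1]
    · rw [pvRank1_o ka kv.1 h1]; simp [h1]
  simp only [List.flatMap_cons, List.flatMap_nil, List.append_nil]
  rw [g0, g2, pv_filter_key fields ka [] hnd]

theorem pv_sorted_prio2 (fields : List (String × List String))
    (hnd : (fields.map Prod.fst).Nodup) (ka kb : String) (hab : ka ≠ kb) :
    PySem.List.sorted fields (fun kv => pvRankAlt kv.1 [ka, kb] []) false
      = (if (PySem.Dict.mk fields).contains ka then [(ka, (PySem.Dict.mk fields).getD ka [])] else [])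
        ++ (if (PySem.Dict.mk fields).contains kb then [(kb, (PySem.Dict.mk fields).getD kb [])] else [])
        ++ fields.filter (fun kv => decide (kv.1 ≠ ka) && decide (kv.1 ≠ kb)) := by
  rw [pv_sorted_groups _ [0, 1, 100] fields (by decide)
      (by
        intro kv _
        by_cases h1 : kv.1 = ka
        · rw [h1, pvRank2_a]; simp
        · by_cases h2 : kv.1 = kb
          · rw [h2, pvRank2_b ka kb hab]; simp
          · rw [pvRank2_o ka kb kv.1 h1 h2]; simp)]
  have g0 : fields.filter (fun kv => decide (pvRankAlt kv.1 [ka, kb] [] = 0))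
      = fields.filter (fun kv => kv.1 == ka) := by
    apply List.filter_congr
    intro kv _
    by_cases h1 : kv.1 = ka
    · rw [h1, pvRank2_a]; simp [h1]
    · by_cases h2 : kv.1 = kb
      · rw [h2, pvRank2_b ka kb hab]; simp [h2, hab.symm]
      · rw [pvRank2_o ka kb kv.1 h1 h2]; simp [h1]
  have g1 : fields.filter (fun kv => decide (pvRankAlt kv.1 [ka, kb] [] = 1))
      = fields.filter (fun kv => kv.1 == kb) := by
    apply List.filter_congr
    intro kv _
    by_cases h1 : kv.1 = ka
    · rw [h1, pvRank2_a]; simp [h1, hab]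
    · by_cases h2 : kv.1 = kb
      · rw [h2, pvRank2_b ka kb hab]; simp [h2]
      · rw [pvRank2_o ka kb kv.1 h1 h2]; simp [h2]
  have g2 : fields.filter (fun kv => decide (pvRankAlt kv.1 [ka, kb] [] = 100))
      = fields.filter (fun kv => decide (kv.1 ≠ ka) && decide (kv.1 ≠ kb)) := by
    apply List.filter_congr
    intro kv _
    by_cases h1 : kv.1 = ka
    · rw [h1, pvRank2_a]; simp [h1]
    · by_cases h2 : kv.1 = kb
      · rw [h2, pvRank2_b ka kb hab]; simp [h2, hab.symm]
      · rw [pvRank2_o ka kb kv.1 h1 h2]; simp [h1, h2]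
  simp only [List.flatMap_cons, List.flatMap_nil, List.append_nil]
  rw [g0, g1, g2, pv_filter_key fields ka [] hnd, pv_filter_key fields kb [] hnd,
    List.append_assoc]

theorem pv_sorted_last2 (fields : List (String × List String))
    (hnd : (fields.map Prod.fst).Nodup) (ka kb : String) (hab : ka ≠ kb) :
    PySem.List.sorted fields (fun kv => pvRankAlt kv.1 [] [ka, kb]) false
      = fields.filter (fun kv => decide (kv.1 ≠ ka) && decide (kv.1 ≠ kb))
        ++ (if (PySem.Dict.mk fields).contains ka then [(ka, (PySem.Dict.mk fields).getD ka [])] else [])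
        ++ (if (PySem.Dict.mk fields).contains kb then [(kb, (PySem.Dict.mk fields).getD kb [])] else []) := by
  rw [pv_sorted_groups _ [100, 200, 201] fields (by decide)
      (by
        intro kv _
        by_cases h1 : kv.1 = ka
        · rw [h1, pvRankL_a]; simp
        · by_cases h2 : kv.1 = kb
          · rw [h2, pvRankL_b ka kb hab]; simp
          · rw [pvRankL_o ka kb kv.1 h1 h2]; simp)]
  have g0 : fields.filter (fun kv => decide (pvRankAlt kv.1 [] [ka, kb] = 200))
      = fields.filter (fun kv => kv.1 == ka) := by
    apply List.filter_congr
    intro kv _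
    by_cases h1 : kv.1 = ka
    · rw [h1, pvRankL_a]; simp [h1]
    · by_cases h2 : kv.1 = kb
      · rw [h2, pvRankL_b ka kb hab]; simp [h2, hab.symm]
      · rw [pvRankL_o ka kb kv.1 h1 h2]; simp [h1]
  have g1 : fields.filter (fun kv => decide (pvRankAlt kv.1 [] [ka, kb] = 201))
      = fields.filter (fun kv => kv.1 == kb) := by
    apply List.filter_congr
    intro kv _
    by_cases h1 : kv.1 = ka
    · rw [h1, pvRankL_a]; simp [h1, hab]
    · by_cases h2 : kv.1 = kb
      · rw [h2, pvRankL_b ka kb hab]; simp [h2]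
      · rw [pvRankL_o ka kb kv.1 h1 h2]; simp [h2]
  have g2 : fields.filter (fun kv => decide (pvRankAlt kv.1 [] [ka, kb] = 100))
      = fields.filter (fun kv => decide (kv.1 ≠ ka) && decide (kv.1 ≠ kb)) := by
    apply List.filter_congr
    intro kv _
    by_cases h1 : kv.1 = ka
    · rw [h1, pvRankL_a]; simp [h1]
    · by_cases h2 : kv.1 = kb
      · rw [h2, pvRankL_b ka kb hab]; simp [h2, hab.symm]
      · rw [pvRankL_o ka kb kv.1 h1 h2]; simp [h1, h2]
  simp only [List.flatMap_cons, List.flatMap_nil, List.append_nil]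
  rw [g0, g1, g2, pv_filter_key fields ka [] hnd, pv_filter_key fields kb [] hnd,
    List.append_assoc]

-- per-branch core equalities: reorder_fields = rank sort on a nodup-keyed highlight dict
theorem pv_core_prio1 (fields : List (String × List String))
    (hnd : (fields.map Prod.fst).Nodup) (ka : String) :
    (pyReorderFields (PySem.Dict.mk fields) [ka] []).items
      = PySem.List.sorted fields (fun kv => pvRankAlt kv.1 [ka] []) false := by
  rw [pv_reorder_items fields hnd [ka] [] (by simp) (by simp) (by simp),
    pv_sorted_prio1 fields hnd ka]
  cases hca : (PySem.Dict.mk fields).contains ka <;>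
    simp only [List.filter_cons, List.filter_nil, hca] <;>
    simp [not_or, List.append_assoc]
theorem pv_core_prio2 (fields : List (String × List String))
    (hnd : (fields.map Prod.fst).Nodup) (ka kb : String) (hab : ka ≠ kb) :
    (pyReorderFields (PySem.Dict.mk fields) [ka, kb] []).items
      = PySem.List.sorted fields (fun kv => pvRankAlt kv.1 [ka, kb] []) false := by
  rw [pv_reorder_items fields hnd [ka, kb] [] (by simp [hab]) (by simp) (by simp),
    pv_sorted_prio2 fields hnd ka kb hab]
  cases hca : (PySem.Dict.mk fields).contains ka <;>
    cases hcb : (PySem.Dict.mk fields).contains kb <;>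
      simp only [List.filter_cons, List.filter_nil, hca, hcb] <;>
      simp [not_or, List.append_assoc]
theorem pv_core_last2 (fields : List (String × List String))
    (hnd : (fields.map Prod.fst).Nodup) (ka kb : String) (hab : ka ≠ kb) :
    (pyReorderFields (PySem.Dict.mk fields) [] [ka, kb]).items
      = PySem.List.sorted fields (fun kv => pvRankAlt kv.1 [] [ka, kb]) false := by
  rw [pv_reorder_items fields hnd [] [ka, kb] (by simp) (by simp [hab]) (by simp),
    pv_sorted_last2 fields hnd ka kb hab]
  cases hca : (PySem.Dict.mk fields).contains ka <;>
    cases hcb : (PySem.Dict.mk fields).contains kb <;>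
      simp only [List.filter_cons, List.filter_nil, hca, hcb] <;>
      simp [not_or, List.append_assoc]

-- facts about a result dict with distinct keys that contains "highlight"
theorem pv_highlight_nodup (result : List (String × List (String × List String)))
    (hin : ∀ kv ∈ result, (kv.2.map Prod.fst).Nodup)
    (hc : (PySem.Dict.mk result).contains "highlight" = true) :
    (((PySem.Dict.mk result).getD "highlight" []).map Prod.fst).Nodup := by
  set d := PySem.Dict.mk result with hd
  have hsome : (d.get? "highlight").isSome = true := by
    rw [← PySem.Dict.contains_eq_isSome_get?]
    exact hc
  obtain ⟨v, hv⟩ := Option.isSome_iff_exists.mp hsome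
  have hmem : ("highlight", v) ∈ result := PySem.Dict.mem_items_of_get?_eq_some d hv
  have : d.getD "highlight" [] = v := by
    simp [PySem.Dict.getD, hv]
  rw [this]
  exact hin _ hmem

-- one result, one of the four recognised sorts: the two per-result transforms agree
theorem pv_result_eq (result : List (String × List (String × List String)))
    (hnd : (result.map Prod.fst).Nodup) (hin : ∀ kv ∈ result, (kv.2.map Prod.fst).Nodup)
    (priority last_ : List String)
    (hcore : ∀ fields : List (String × List String), (fields.map Prod.fst).Nodup →
        (pyReorderFields (PySem.Dict.mk fields) priority last_).items
          = PySem.List.sorted fields (fun kv => pvRankAlt kv.1 priority last_) false) :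
    (if (PySem.Dict.mk result).contains "highlight" then
      ((PySem.Dict.mk result).insert "highlight"
        (pyReorderFields (PySem.Dict.mk ((PySem.Dict.mk result).getD "highlight" [])) priority last_).items).items
    else result)
      = (if (PySem.Dict.mk result).contains "highlight" then
          ((PySem.Dict.mk result).insert "highlight"
            (PySem.Dict.ofList (PySem.List.sorted (PySem.Dict.mk ((PySem.Dict.mk result).getD "highlight" [])).items
              (fun kv => pvRankAlt kv.1 priority last_) false)).items).items
        else result) := by
  by_cases hc : (PySem.Dict.mk result).contains "highlight"
  · rw [if_pos hc, if_pos hc]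
    have hfnd := pv_highlight_nodup result hin hc
    set fields := (PySem.Dict.mk result).getD "highlight" [] with hf
    have hsortnd : ((PySem.List.sorted fields (fun kv => pvRankAlt kv.1 priority last_) false).map Prod.fst).Nodup := by
      have hperm : (PySem.List.sorted fields (fun kv => pvRankAlt kv.1 priority last_) false).Perm fields :=
        PySem.List.sorted_perm _ _ _
      exact hfnd.perm (hperm.map Prod.fst).symm
    rw [pv_ofList_items _ hsortnd]
    rw [hcore fields hfnd]
  · rw [if_neg hc, if_neg hc]

-- the whole map, for one recognised sort whose (priority, last) pair satisfies the core equality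
theorem pv_map_eq (results : List (List (String × List (String × List String))))
    (hpre : ∀ r ∈ results, (r.map Prod.fst).Nodup ∧ ∀ kv ∈ r, (kv.2.map Prod.fst).Nodup)
    (priority last_ : List String)
    (hcore : ∀ fields : List (String × List String), (fields.map Prod.fst).Nodup →
        (pyReorderFields (PySem.Dict.mk fields) priority last_).items
          = PySem.List.sorted fields (fun kv => pvRankAlt kv.1 priority last_) false) :
    results.map (fun result =>
      if (PySem.Dict.mk result).contains "highlight" then
        ((PySem.Dict.mk result).insert "highlight"
          (pyReorderFields (PySem.Dict.mk ((PySem.Dict.mk result).getD "highlight" [])) priority last_).items).items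
      else result)
      = results.map (fun result =>
          if (PySem.Dict.mk result).contains "highlight" then
            ((PySem.Dict.mk result).insert "highlight"
              (PySem.Dict.ofList (PySem.List.sorted (PySem.Dict.mk ((PySem.Dict.mk result).getD "highlight" [])).items
                (fun kv => pvRankAlt kv.1 priority last_) false)).items).items
          else result) := by
  apply List.map_congr_left
  intro r hr
  exact pv_result_eq r (hpre r hr).1 (hpre r hr).2 priority last_ hcore

-- an unrecognised sort leaves every result unchanged on the A side too
theorem pv_map_id (results : List (List (String × List (String × List String))))
    (hpre : ∀ r ∈ results, (r.map Prod.fst).Nodup ∧ ∀ kv ∈ r, (kv.2.map Prod.fst).Nodup) :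
    results.map (fun result =>
      if (PySem.Dict.mk result).contains "highlight" then
        ((PySem.Dict.mk result).insert "highlight"
          (PySem.Dict.mk ((PySem.Dict.mk result).getD "highlight" [])).items).items
      else result)
      = results := by
  conv_rhs => rw [← List.map_id results]
  apply List.map_congr_left
  intro r hr
  by_cases hc : (PySem.Dict.mk r).contains "highlight"
  · rw [if_pos hc]
    exact pv_insert_getD_self (PySem.Dict.mk r) "highlight" [] (hpre r hr).1 hc
  · rw [if_neg hc]
    rfl

-- ===== VERDICT (by name: the statement is the Claim_ definition above) =====
theorem rearrange_opensearch_results_for_relevant_fields_spec : Claim_equal_rearrange_opensearch_results_for_relevant_fields := by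
  intro results sort hdom hpre
  unfold Spec_rearrange_opensearch_results_for_relevant_fields
  unfold rearrange_opensearch_results_for_relevant_fields rearrange_opensearch_results_for_relevant_fields_alt
  by_cases hs1 : sort = "file_name"
  · subst hs1
    have hg : pvSpecAlt.get? "file_name" = some (["file_name"], ([] : List String)) := by decide
    rw [hg]
    simp only [beq_self_eq_true, if_true, String.reduceBEq]
    exact pv_map_eq results hpre _ _ (fun fields hf => pv_core_prio1 fields hf "file_name")
  · by_cases hs2 : sort = "description"
    · subst hs2
      have hg : pvSpecAlt.get? "description" = some (["description", "file_name"], ([] : List String)) := by decide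
      rw [hg]
      simp only [beq_self_eq_true, if_true, String.reduceBEq, Bool.false_eq_true, if_false]
      exact pv_map_eq results hpre _ _
        (fun fields hf => pv_core_prio2 fields hf "description" "file_name" (by decide))
    · by_cases hs3 : sort = "metadata"
      · subst hs3
        have hg : pvSpecAlt.get? "metadata" = some (([] : List String), ["file_name", "content"]) := by decide
        rw [hg]
        simp only [beq_self_eq_true, if_true, String.reduceBEq, Bool.false_eq_true, if_false]
        exact pv_map_eq results hpre _ _
          (fun fields hf => pv_core_last2 fields hf "file_name" "content" (by decide))
      · by_cases hs4 : sort = "content"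
        · subst hs4
          have hg : pvSpecAlt.get? "content" = some (["content", "file_name"], ([] : List String)) := by decide
          rw [hg]
          simp only [beq_self_eq_true, if_true, String.reduceBEq, Bool.false_eq_true, if_false]
          exact pv_map_eq results hpre _ _
            (fun fields hf => pv_core_prio2 fields hf "content" "file_name" (by decide))
        · have hg : pvSpecAlt.get? sort = none := by
            have hspec : pvSpecAlt = PySem.Dict.mk
                [("file_name", (["file_name"], [])),
                 ("description", (["description", "file_name"], [])),
                 ("metadata", ([], ["file_name", "content"])),
                 ("content", (["content", "file_name"], []))] := by decide
            rw [hspec]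
            simp [PySem.Dict.get?_mk_cons, Ne.symm hs1, Ne.symm hs2, Ne.symm hs3, Ne.symm hs4,
              PySem.Dict.get?]
          rw [hg]
          have hc1 : (sort == "file_name") = false := by simp [hs1]
          have hc2 : (sort == "description") = false := by simp [hs2]
          have hc3 : (sort == "metadata") = false := by simp [hs3]
          have hc4 : (sort == "content") = false := by simp [hs4]
          simp only [hc1, hc2, hc3, hc4, Bool.false_eq_true, if_false]
          exact pv_map_id results hpre
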